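-- pv_equiv track=rewrite | github.com/Nana0606/lyrics_generation | seq2seq_model/train_seq2seq_word_based.py | generate_input_target_text
-- ===== SOURCE A (Python) =====
-- def generate_input_target_text(cut_word_list):
--     """
--     生成对应的训练集X和y，这里X和y都是分词过的词语list
--     :param cut_word_list: 存储所有歌词，其每个元素是一个list，存储一首歌（一首歌使用的又是list of list结构，一个list是一句歌词）；
--     :return:
--     input_texts: 数据集X对应的list
--     target_texts: 数据集y对应的list
--     max_seq_input: X中样本的最大长度
--     max_seq_target: y中样本的最大长度
--     input_words: 数据集X中的字列表，用于统计词频，产生word2index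
--     target_words: 数据集y中的字列表，用于统计词频，产生index2word
--     """
--     # 生成X和y
--     input_texts = []    # 数据集X
--     target_texts = []    # 数据集y
--     input_words = []    # 数据集X中的字列表，用于统计词频，产生word2index
--     target_words = []    # 数据集y中的字列表，用于统计词频，产生index2word
--     num_songs = len(cut_word_list)
--     max_seq_input = 0   # 输入序列中的最大长度（模型中需要使用）
--     max_seq_target = 0  # 输出序列中的最大长度（模型中需要使用）
--     for i in range(0, num_songs):
--         num_lines_eachSong = len(cut_word_list[i])
--         for j in range(0, num_lines_eachSong - 1):
--             input_texts.append(cut_word_list[i][j])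
--             input_words += (cut_word_list[i][j])
--             max_seq_input = max(max_seq_input, len(cut_word_list[i][j]))
--             # 开始和结束的位置分别是：“\t”和"\n"
--             target_texts.append(["\t"] + cut_word_list[i][j + 1]+ ["\n"])
--             target_words += (["\t"] + cut_word_list[i][j + 1] + ["\n"])
--             max_seq_target = max(max_seq_target, len(["\t"] + cut_word_list[i][j + 1] + ["\n"]))
--     return input_texts, target_texts, max_seq_input, max_seq_target, input_words, target_words
-- ===== SOURCE B (Python) =====
-- def generate_input_target_text(cut_word_list):
--     # B: divide-and-conquer over the song list with an associative merge of
--     # six-tuples; a single song's contribution is built from zipped adjacent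
--     # line pairs. Different structure from the fused accumulator loop of A.
--     return _solve(cut_word_list)
--
--
-- def _one_song(song):
--     pairs = list(zip(song, song[1:]))
--     input_texts = [x for x, _ in pairs]
--     target_texts = [["\t"] + y + ["\n"] for _, y in pairs]
--     max_seq_input = max((len(l) for l in input_texts), default=0)
--     max_seq_target = max((len(t) for t in target_texts), default=0)
--     input_words = [w for l in input_texts for w in l]
--     target_words = [w for t in target_texts for w in t]
--     return (input_texts, target_texts, max_seq_input, max_seq_target,
--             input_words, target_words)
--
--
-- def _merge(a, b):
--     return (a[0] + b[0], a[1] + b[1], max(a[2], b[2]), max(a[3], b[3]),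
--             a[4] + b[4], a[5] + b[5])
--
--
-- def _solve(songs):
--     if len(songs) == 0:
--         return ([], [], 0, 0, [], [])
--     if len(songs) == 1:
--         return _one_song(songs[0])
--     mid = len(songs) // 2
--     return _merge(_solve(songs[:mid]), _solve(songs[mid:]))
-- ===== Notes on version B (the rewrite author's own statement) =====
-- stated objective: alternative
-- what changed: Replaces A's fused forward loop threading six accumulators over index pairs with a divide-and-conquer over the song list: each song's contribution is computed from zipped adjacent line pairs and results are combined by an associative six-tuple merge (list concatenation and max).
import Mathlib
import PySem

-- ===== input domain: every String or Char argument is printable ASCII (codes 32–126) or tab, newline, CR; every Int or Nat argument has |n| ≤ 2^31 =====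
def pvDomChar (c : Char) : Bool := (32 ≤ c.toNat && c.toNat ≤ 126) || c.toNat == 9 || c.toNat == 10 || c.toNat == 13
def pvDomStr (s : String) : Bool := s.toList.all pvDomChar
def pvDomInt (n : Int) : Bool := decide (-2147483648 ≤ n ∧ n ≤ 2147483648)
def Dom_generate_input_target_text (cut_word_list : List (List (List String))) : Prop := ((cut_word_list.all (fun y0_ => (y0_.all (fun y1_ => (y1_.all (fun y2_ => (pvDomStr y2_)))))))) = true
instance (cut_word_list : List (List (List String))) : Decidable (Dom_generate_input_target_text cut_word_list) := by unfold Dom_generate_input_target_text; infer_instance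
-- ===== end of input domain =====

-- B is a divide-and-conquer over the song list with an associative six-tuple merge (alternative structure, similar cost).


-- ===== PORT A =====
-- inner loop 'for j in range(0, num_lines_eachSong - 1)' over adjacent pairs (song[j], song[j+1]),
-- as structural recursion threading the six accumulators
def pvLoopSong (lines : List (List String))
    (st : List (List String) × List (List String) × Int × Int × List String × List String) :
    List (List String) × List (List String) × Int × Int × List String × List String :=
  match lines with
  | x :: y :: rest =>
    let (it, tt, mi, mt, iw, tw) := st
    pvLoopSong (y :: rest)
      (it ++ [x], tt ++ [("\t" : String) :: y ++ ["\n"]],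
       max mi (x.length : Int), max mt ((("\t" : String) :: y ++ ["\n"]).length : Int),
       iw ++ x, tw ++ (("\t" : String) :: y ++ ["\n"]))
  | _ => st

def generate_input_target_text (cut_word_list : List (List (List String))) : List (List String) × List (List String) × Int × Int × List String × List String :=
  cut_word_list.foldl (fun st song => pvLoopSong song st) ([], [], 0, 0, [], [])

-- ===== PORT B =====
-- _one_song: zipped adjacent line pairs of a single song
def pvOneSong (song : List (List String)) :
    List (List String) × List (List String) × Int × Int × List String × List String :=
  let pairs := song.zip (song.drop 1)
  let input_texts := pairs.map Prod.fst
  let target_texts := pairs.map (fun p => ("\t" : String) :: p.2 ++ ["\n"])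
  let max_seq_input := (input_texts.map (fun l => (l.length : Int))).foldl max 0
  let max_seq_target := (target_texts.map (fun t => (t.length : Int))).foldl max 0
  let input_words := input_texts.flatMap id
  let target_words := target_texts.flatMap id
  (input_texts, target_texts, max_seq_input, max_seq_target, input_words, target_words)

-- _merge: associative combination of two six-tuples
def pvMerge (a b : List (List String) × List (List String) × Int × Int × List String × List String) :
    List (List String) × List (List String) × Int × Int × List String × List String :=
  (a.1 ++ b.1, a.2.1 ++ b.2.1, max a.2.2.1 b.2.2.1, max a.2.2.2.1 b.2.2.2.1,
   a.2.2.2.2.1 ++ b.2.2.2.2.1, a.2.2.2.2.2 ++ b.2.2.2.2.2)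

-- _solve: split the song list in half and merge the recursive results
-- (fuel = list length bounds the recursion depth; it is a totality guard only and is
-- never exhausted, since each recursive call strictly shrinks the list)
def pvSolveF (fuel : Nat) (songs : List (List (List String))) :
    List (List String) × List (List String) × Int × Int × List String × List String :=
  match fuel, songs with
  | _, [] => ([], [], 0, 0, [], [])
  | _, [s] => pvOneSong s
  | 0, _ => ([], [], 0, 0, [], [])
  | f + 1, s1 :: s2 :: rest =>
    pvMerge (pvSolveF f ((s1 :: s2 :: rest).take ((s1 :: s2 :: rest).length / 2)))
            (pvSolveF f ((s1 :: s2 :: rest).drop ((s1 :: s2 :: rest).length / 2)))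

def generate_input_target_text_alt (cut_word_list : List (List (List String))) : List (List String) × List (List String) × Int × Int × List String × List String :=
  pvSolveF cut_word_list.length cut_word_list

-- ===== PRECONDITION & SPEC =====
def Spec_generate_input_target_text (cut_word_list : List (List (List String))) (out : List (List String) × List (List String) × Int × Int × List String × List String) : Prop := out = generate_input_target_text_alt cut_word_list
instance (cut_word_list : List (List (List String))) (out : List (List String) × List (List String) × Int × Int × List String × List String) : Decidable (Spec_generate_input_target_text cut_word_list out) := by unfold Spec_generate_input_target_text; infer_instance

-- ===== CLAIM (what is proved, stated in full; the proofs are below) =====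
def Claim_equal_generate_input_target_text : Prop := ∀ (cut_word_list : List (List (List String))), Dom_generate_input_target_text cut_word_list → Spec_generate_input_target_text cut_word_list (generate_input_target_text cut_word_list)

-- ===== LEMMAS AND PROOFS =====

def pvDec (line : List String) : List String := ("\t" : String) :: line ++ ["\n"]

-- canonical value both programs compute
def pvT (l : List (List (List String))) :
    List (List String) × List (List String) × Int × Int × List String × List String :=
  (l.flatMap (fun s => s.dropLast),
   l.flatMap (fun s => (s.drop 1).map pvDec),
   ((l.flatMap (fun s => s.dropLast)).map (fun x => (x.length : Int))).foldl max 0,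
   ((l.flatMap (fun s => (s.drop 1).map pvDec)).map (fun t => (t.length : Int))).foldl max 0,
   (l.flatMap (fun s => s.dropLast)).flatMap id,
   (l.flatMap (fun s => (s.drop 1).map pvDec)).flatMap id)

theorem pvLoopSong_char (lines : List (List String)) :
    ∀ it tt mi mt iw tw,
    pvLoopSong lines (it, tt, mi, mt, iw, tw) =
      (it ++ lines.dropLast,
       tt ++ (lines.drop 1).map pvDec,
       (lines.dropLast.map (fun l => (l.length : Int))).foldl max mi,
       (((lines.drop 1).map pvDec).map (fun t => (t.length : Int))).foldl max mt,
       iw ++ lines.dropLast.flatMap id,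
       tw ++ ((lines.drop 1).map pvDec).flatMap id) := by
  induction lines with
  | nil => intro it tt mi mt iw tw; simp [pvLoopSong]
  | cons x rest ih =>
    intro it tt mi mt iw tw
    cases rest with
    | nil => simp [pvLoopSong]
    | cons y rest' =>
      rw [pvLoopSong, ih]
      simp [pvDec, List.dropLast_cons_of_ne_nil, List.flatMap_cons]

theorem foldl_char (cut_word_list : List (List (List String))) :
    ∀ it tt mi mt iw tw,
    cut_word_list.foldl (fun st song => pvLoopSong song st) (it, tt, mi, mt, iw, tw) =
      (it ++ cut_word_list.flatMap (fun s => s.dropLast),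
       tt ++ cut_word_list.flatMap (fun s => (s.drop 1).map pvDec),
       ((cut_word_list.flatMap (fun s => s.dropLast)).map (fun l => (l.length : Int))).foldl max mi,
       ((cut_word_list.flatMap (fun s => (s.drop 1).map pvDec)).map (fun t => (t.length : Int))).foldl max mt,
       iw ++ (cut_word_list.flatMap (fun s => s.dropLast)).flatMap id,
       tw ++ (cut_word_list.flatMap (fun s => (s.drop 1).map pvDec)).flatMap id) := by
  induction cut_word_list with
  | nil => intro it tt mi mt iw tw; simp
  | cons s rest ih =>
    intro it tt mi mt iw tw
    simp only [List.foldl_cons, pvLoopSong_char, ih, List.flatMap_cons, List.map_append,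
      List.foldl_append, List.flatMap_append, List.append_assoc]

-- max-fold facts for merging the two halves
theorem pv_foldl_max_shift (ys : List Int) :
    ∀ a b, ys.foldl max (max a b) = max a (ys.foldl max b) := by
  induction ys with
  | nil => intro a b; rfl
  | cons y t ih =>
    intro a b
    simp only [List.foldl_cons, max_assoc, ih]

theorem pv_le_foldl_max (ys : List Int) : ∀ a : Int, a ≤ ys.foldl max a := by
  induction ys with
  | nil => intro a; exact le_refl a
  | cons y t ih =>
    intro a
    exact le_trans (le_max_left a y) (ih (max a y))

theorem pv_foldl_max_append (xs ys : List Int) :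
    (xs ++ ys).foldl max 0 = max (xs.foldl max 0) (ys.foldl max 0) := by
  have h0 : (0 : Int) ≤ xs.foldl max 0 := pv_le_foldl_max xs 0
  calc (xs ++ ys).foldl max 0 = ys.foldl max (xs.foldl max 0) := List.foldl_append ..
    _ = ys.foldl max (max (xs.foldl max 0) 0) := by rw [max_eq_left h0]
    _ = max (xs.foldl max 0) (ys.foldl max 0) := pv_foldl_max_shift ys _ 0

theorem pv_merge_T (a b : List (List (List String))) :
    pvMerge (pvT a) (pvT b) = pvT (a ++ b) := by
  simp only [pvT, pvMerge, List.flatMap_append, List.map_append,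
    pv_foldl_max_append]

theorem pv_zip_fst (s : List (List String)) :
    (s.zip (s.drop 1)).map Prod.fst = s.dropLast := by
  induction s with
  | nil => rfl
  | cons x rest ih =>
    cases rest with
    | nil => rfl
    | cons y r =>
      simp only [List.drop_one, List.tail_cons, List.zip_cons_cons, List.map_cons,
        List.dropLast_cons_of_ne_nil (List.cons_ne_nil y r)]
      simpa [List.drop_one] using ih

theorem pv_zip_snd (s : List (List String)) :
    (s.zip (s.drop 1)).map Prod.snd = s.drop 1 := by
  induction s with
  | nil => rfl
  | cons x rest ih =>
    cases rest with
    | nil => rfl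
    | cons y r =>
      simp only [List.drop_one, List.tail_cons, List.zip_cons_cons, List.map_cons]
      simpa [List.drop_one] using ih

theorem pv_one_T (s : List (List String)) : pvOneSong s = pvT [s] := by
  have hsnd : (s.zip (s.drop 1)).map (fun p => pvDec p.2) = (s.drop 1).map pvDec := by
    have := congrArg (List.map pvDec) (pv_zip_snd s)
    simpa [List.map_map, Function.comp] using this
  simp only [pvOneSong, pvT, List.flatMap_cons, List.flatMap_nil, List.append_nil]
  rw [pv_zip_fst]
  have : ((s.zip (s.drop 1)).map (fun p => ("\t" : String) :: p.2 ++ ["\n"])) =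
      (s.drop 1).map pvDec := by
    simpa [pvDec] using hsnd
  rw [this]

theorem pv_solve_T : ∀ n (l : List (List (List String))), l.length ≤ n → pvSolveF n l = pvT l := by
  intro n
  induction n with
  | zero =>
    intro l hl
    have : l = [] := List.length_eq_zero_iff.mp (Nat.le_zero.mp hl)
    subst this; rfl
  | succ n ih =>
    intro l hl
    match l with
    | [] => rfl
    | [s] => exact pv_one_T s
    | s1 :: s2 :: rest =>
      rw [pvSolveF]
      have hlen : (s1 :: s2 :: rest).length = rest.length + 2 := by simp
      have h1 : ((s1 :: s2 :: rest).take ((s1 :: s2 :: rest).length / 2)).length ≤ n := by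
        simp only [List.length_take, hlen]; omega
      have h2 : ((s1 :: s2 :: rest).drop ((s1 :: s2 :: rest).length / 2)).length ≤ n := by
        simp only [List.length_drop, hlen]
        have := hl; simp only [hlen] at this; omega
      rw [ih _ h1, ih _ h2, pv_merge_T, List.take_append_drop]

-- ===== VERDICT (by name: the statement is the Claim_ definition above) =====
theorem generate_input_target_text_spec : Claim_equal_generate_input_target_text := by
  intro cwl _
  unfold Spec_generate_input_target_text generate_input_target_text generate_input_target_text_alt
  rw [foldl_char, pv_solve_T cwl.length cwl (le_refl _)]
  simp [pvT]
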